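-- pv_equiv track=rewrite | github.com/CryptoBusher/Chrome-profiles-manager | src/core/profile/profile_manager.py | sort_profiles
-- ===== SOURCE A (Python) =====
-- def sort_profiles(profiles_list: list[str]) -> list[str]:
--     profiles_list_str = [str(p) for p in profiles_list]
--
--     numeric_profiles = [p for p in profiles_list_str if p.isdigit()]
--     non_numeric_users = [p for p in profiles_list_str if not any(char.isdigit() for char in p)]
--     numeric_profiles.sort(key=int)
--     non_numeric_users.sort()
--
--     profiles_list_sorted = numeric_profiles + non_numeric_users
--     return profiles_list_sorted
-- ===== SOURCE B (Python) =====
-- def sort_profiles(profiles_list: list[str]) -> list[str]: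
--     def insort(xs, p, lt):
--         # insert p into already-ordered xs, after every element e with not lt(p, e)
--         out = []
--         k = 0
--         for q in xs:
--             if lt(p, q):
--                 break
--             out.append(q)
--             k += 1
--         return out + [p] + xs[k:]
--
--     nums = []
--     names = []
--     for x in profiles_list:
--         p = str(x)
--         if p.isdigit():
--             nums = insort(nums, p, lambda a, b: int(a) < int(b))
--         elif not any(c.isdigit() for c in p):
--             names = insort(names, p, lambda a, b: a < b)
--     return nums + names
-- ===== Notes on version B (the rewrite author's own statement) =====
-- stated objective: alternative
-- what changed: Replaces the two filter passes plus two separate library sorts and concatenation by a single pass over the input that classifies each string once and inserts it in order into one of two incrementally maintained sorted lists (no sort call).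
import Mathlib
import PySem

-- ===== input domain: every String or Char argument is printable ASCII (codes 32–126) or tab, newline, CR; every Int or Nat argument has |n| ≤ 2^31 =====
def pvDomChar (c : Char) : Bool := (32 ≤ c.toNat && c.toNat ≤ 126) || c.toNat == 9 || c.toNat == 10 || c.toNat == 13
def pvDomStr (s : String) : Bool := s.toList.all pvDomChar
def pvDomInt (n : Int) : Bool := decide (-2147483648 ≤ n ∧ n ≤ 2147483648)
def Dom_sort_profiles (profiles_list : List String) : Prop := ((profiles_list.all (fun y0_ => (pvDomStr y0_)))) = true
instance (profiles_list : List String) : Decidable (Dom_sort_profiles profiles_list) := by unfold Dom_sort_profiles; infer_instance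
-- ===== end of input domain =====

-- B replaces A's two filters + two library sorts by a single classifying pass with ordered insertion; same return value (alternative decomposition, not faster).

-- ===== PORT A =====
-- str(p) on a str is the identity; key=int on an all-digit string is PySem.Int.ofStr?,
-- which is some there, so .getD 0 is exact on every element it is applied to.
def sort_profiles (profiles_list : List String) : List String :=
  let profiles_list_str := profiles_list.map (fun p => p)
  let numeric_profiles := profiles_list_str.filter (fun p => PySem.Str.strIsdigit p)
  let non_numeric_users := profiles_list_str.filter (fun p => !(p.toList.any (fun c => PySem.Chars.isdigit c)))
  let numeric_sorted := PySem.List.sorted numeric_profiles (fun p => (PySem.Int.ofStr? p).getD 0) false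
  let non_numeric_sorted := PySem.List.sorted non_numeric_users (fun p => p) false
  numeric_sorted ++ non_numeric_sorted

-- ===== PORT B =====
-- Source B's insort: the for-loop over xs carries `out` (the appended prefix); the
-- not-yet-traversed suffix xs[k:] is the recursion remainder. Exact transliteration.
def pvInsortGo (lt : String → String → Bool) (p : String) (out : List String) : List String → List String
  | [] => out ++ [p]
  | q :: rest => if lt p q then out ++ [p] ++ (q :: rest) else pvInsortGo lt p (out ++ [q]) rest

def pvInsort (lt : String → String → Bool) (xs : List String) (p : String) : List String :=
  pvInsortGo lt p [] xs

-- str(x) on a str is the identity; int(a) in Source B's numeric comparator is applied to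
-- all-digit strings only, where PySem.Int.ofStr? is some, so .getD 0 is exact there.
def sort_profiles_alt (profiles_list : List String) : List String :=
  let st := profiles_list.foldl (fun (acc : List String × List String) x =>
      if PySem.Str.strIsdigit x then
        (pvInsort (fun a b => decide ((PySem.Int.ofStr? a).getD 0 < (PySem.Int.ofStr? b).getD 0)) acc.1 x, acc.2)
      else if !(x.toList.any (fun c => PySem.Chars.isdigit c)) then
        (acc.1, pvInsort (fun a b => decide (a < b)) acc.2 x)
      else acc) ([], [])
  st.1 ++ st.2

-- ===== PRECONDITION & SPEC =====
def Spec_sort_profiles (profiles_list : List String) (out : List String) : Prop := out = sort_profiles_alt profiles_list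
instance (profiles_list : List String) (out : List String) : Decidable (Spec_sort_profiles profiles_list out) := by unfold Spec_sort_profiles; infer_instance

-- ===== CLAIM (what is proved, stated in full; the proofs are below) =====
def Claim_equal_sort_profiles : Prop := ∀ (profiles_list : List String), Dom_sort_profiles profiles_list → Spec_sort_profiles profiles_list (sort_profiles profiles_list)

-- ===== LEMMAS AND PROOFS =====

-- Source B's insort inserts p after every element not greater than it: it is insertBy.
theorem pvInsortGo_eq (lt : String → String → Bool) (p : String) :
    ∀ (rest out : List String), pvInsortGo lt p out rest = out ++ PySem.List.insertBy lt p rest := by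
  intro rest
  induction rest with
  | nil => intro out; simp [pvInsortGo, PySem.List.insertBy]
  | cons q rs ih =>
      intro out
      by_cases h : lt p q
      · simp [pvInsortGo, PySem.List.insertBy, h]
      · simp [pvInsortGo, PySem.List.insertBy, h, ih]

theorem pvInsort_eq (lt : String → String → Bool) (xs : List String) (p : String) :
    pvInsort lt xs p = PySem.List.insertBy lt p xs := by
  simp [pvInsort, pvInsortGo_eq]

-- an all-digit (hence nonempty) string contains a digit
theorem strIsdigit_any (p : String) (h : PySem.Str.strIsdigit p = true) :
    p.toList.any (fun c => PySem.Chars.isdigit c) = true := by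
  simp only [PySem.Str.strIsdigit, PySem.Chars.strIsdigit, Bool.and_eq_true, Bool.not_eq_true',
    List.all_eq_true] at h
  rcases h with ⟨h1, h2⟩
  cases hp : p.toList with
  | nil => rw [hp] at h1; simp at h1
  | cons c cs =>
      have := h2 c (by simp [hp])
      simp [List.any_cons, this]

-- B's single classifying pass equals the pair (insert-fold over A's first filter, insert-fold over A's second filter)
theorem loop_split (l : List String) :
    ∀ (n m : List String),
    l.foldl (fun (acc : List String × List String) x =>
      if PySem.Str.strIsdigit x then
        (pvInsort (fun a b => decide ((PySem.Int.ofStr? a).getD 0 < (PySem.Int.ofStr? b).getD 0)) acc.1 x, acc.2)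
      else if !(x.toList.any (fun c => PySem.Chars.isdigit c)) then
        (acc.1, pvInsort (fun a b => decide (a < b)) acc.2 x)
      else acc) (n, m)
    = ((l.filter (fun p => PySem.Str.strIsdigit p)).foldl
         (fun acc x => PySem.List.insertBy (fun a b => decide ((PySem.Int.ofStr? a).getD 0 < (PySem.Int.ofStr? b).getD 0)) x acc) n,
       (l.filter (fun p => !(p.toList.any (fun c => PySem.Chars.isdigit c)))).foldl
         (fun acc x => PySem.List.insertBy (fun a b => decide (a < b)) x acc) m) := by
  induction l with
  | nil => intro n m; simp
  | cons x t ih =>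
      intro n m
      simp only [List.foldl_cons, List.filter_cons]
      by_cases h1 : PySem.Str.strIsdigit x = true
      · have hn2 : ¬ ((!(x.toList.any fun c => PySem.Chars.isdigit c)) = true) := by
          simp [strIsdigit_any x h1]
        rw [if_pos h1, if_pos h1, if_neg hn2, List.foldl_cons, ih, pvInsort_eq]
      · by_cases h2 : (x.toList.any fun c => PySem.Chars.isdigit c) = true
        · have hn2 : ¬ ((!(x.toList.any fun c => PySem.Chars.isdigit c)) = true) := by
            simp [h2]
          rw [if_neg h1, if_neg hn2, if_neg h1, if_neg hn2]
          exact ih n m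
        · have hp2 : (!(x.toList.any fun c => PySem.Chars.isdigit c)) = true := by
            cases hx : (x.toList.any fun c => PySem.Chars.isdigit c) <;> simp_all
          rw [if_neg h1, if_pos hp2, if_neg h1, if_pos hp2, List.foldl_cons, ih, pvInsort_eq]

-- ===== VERDICT (by name: the statement is the Claim_ definition above) =====
theorem sort_profiles_spec : Claim_equal_sort_profiles := by
  intro profiles_list _
  unfold Spec_sort_profiles sort_profiles sort_profiles_alt
  rw [loop_split]
  simp [PySem.List.sorted_eq_foldl_insertBy]
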